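-- pv_equiv track=rewrite | github.com/stachuman/meshcore_simv2 | tools/gen_grid_test.py | grid_positions
-- ===== SOURCE A (Python) =====
-- def grid_positions(rows, cols):
--     """Return all (row, col) positions in priority order: corners, edges, interior."""
--     corners = []
--     edges = []
--     interior = []
--     for r in range(rows):
--         for c in range(cols):
--             is_edge_r = r == 0 or r == rows - 1
--             is_edge_c = c == 0 or c == cols - 1
--             if is_edge_r and is_edge_c:
--                 corners.append((r, c))
--             elif is_edge_r or is_edge_c:
--                 edges.append((r, c))
--             else:
--                 interior.append((r, c))
--     return corners, edges, interior
-- ===== SOURCE B (Python) =====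
-- def grid_positions(rows, cols):
--     """Return all (row, col) positions in priority order: corners, edges, interior."""
--     if rows <= 0 or cols <= 0:
--         return [], [], []
--     row_b = [0] if rows == 1 else [0, rows - 1]
--     col_b = [0] if cols == 1 else [0, cols - 1]
--     corners = [(r, c) for r in row_b for c in col_b]
--     edges = [(0, c) for c in range(1, cols - 1)]
--     for r in range(1, rows - 1):
--         edges += [(r, c) for c in col_b]
--     if rows > 1:
--         edges += [(rows - 1, c) for c in range(1, cols - 1)]
--     interior = [(r, c) for r in range(1, rows - 1) for c in range(1, cols - 1)]
--     return corners, edges, interior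
-- ===== Notes on version B (the rewrite author's own statement) =====
-- stated objective: alternative
-- what changed: Instead of scanning every cell and classifying it with per-cell boundary tests, B emits the interior rectangle directly as a comprehension over range(1,rows-1)xrange(1,cols-1) and builds corners and edges from the border frame (boundary row/column lists and middle ranges), with no classification test on interior cells.
import Mathlib
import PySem

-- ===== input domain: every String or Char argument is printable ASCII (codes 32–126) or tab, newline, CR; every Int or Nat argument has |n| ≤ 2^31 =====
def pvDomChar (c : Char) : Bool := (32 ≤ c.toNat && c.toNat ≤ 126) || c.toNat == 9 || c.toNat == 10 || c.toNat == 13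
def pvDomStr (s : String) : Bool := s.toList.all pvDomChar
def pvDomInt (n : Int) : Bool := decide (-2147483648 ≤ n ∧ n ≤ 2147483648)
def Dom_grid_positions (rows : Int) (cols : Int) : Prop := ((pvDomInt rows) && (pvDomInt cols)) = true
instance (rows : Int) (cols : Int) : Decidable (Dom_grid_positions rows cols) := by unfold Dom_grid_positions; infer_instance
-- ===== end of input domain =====

-- B replaces A's uniform per-cell classification by emitting the interior rectangle and the
-- border frame (corner rows/columns vs middle ranges) directly; objective: alternative.

-- ===== PORT A =====
def grid_positions (rows : Int) (cols : Int) : (List (Int × Int)) × (List (Int × Int)) × (List (Int × Int)) :=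
  (PySem.List.pyRange 0 rows).foldl
    (fun acc r =>
      (PySem.List.pyRange 0 cols).foldl
        (fun acc c =>
          let is_edge_r : Bool := r == 0 || r == rows - 1
          let is_edge_c : Bool := c == 0 || c == cols - 1
          if is_edge_r && is_edge_c then (acc.1 ++ [(r, c)], acc.2.1, acc.2.2)
          else if is_edge_r || is_edge_c then (acc.1, acc.2.1 ++ [(r, c)], acc.2.2)
          else (acc.1, acc.2.1, acc.2.2 ++ [(r, c)]))
        acc)
    ([], [], [])

-- ===== PORT B =====
def grid_positions_alt (rows : Int) (cols : Int) : (List (Int × Int)) × (List (Int × Int)) × (List (Int × Int)) :=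
  if rows ≤ 0 ∨ cols ≤ 0 then ([], [], [])
  else
    let row_b : List Int := if rows == 1 then [0] else [0, rows - 1]
    let col_b : List Int := if cols == 1 then [0] else [0, cols - 1]
    let corners := row_b.flatMap (fun r => col_b.map (fun c => (r, c)))
    let edges := (PySem.List.pyRange 1 (cols - 1)).map (fun c => ((0 : Int), c))
    let edges := (PySem.List.pyRange 1 (rows - 1)).foldl
        (fun acc r => acc ++ col_b.map (fun c => (r, c))) edges
    let edges := if rows > 1 then
        edges ++ (PySem.List.pyRange 1 (cols - 1)).map (fun c => (rows - 1, c))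
      else edges
    let interior := (PySem.List.pyRange 1 (rows - 1)).flatMap
        (fun r => (PySem.List.pyRange 1 (cols - 1)).map (fun c => (r, c)))
    (corners, edges, interior)

-- ===== PRECONDITION & SPEC =====
def Spec_grid_positions (rows : Int) (cols : Int) (out : (List (Int × Int)) × (List (Int × Int)) × (List (Int × Int))) : Prop := out = grid_positions_alt rows cols
instance (rows : Int) (cols : Int) (out : (List (Int × Int)) × (List (Int × Int)) × (List (Int × Int))) : Decidable (Spec_grid_positions rows cols out) := by unfold Spec_grid_positions; infer_instance

-- ===== CLAIM (what is proved, stated in full; the proofs are below) =====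
def Claim_equal_grid_positions : Prop := ∀ (rows : Int) (cols : Int), Dom_grid_positions rows cols → Spec_grid_positions rows cols (grid_positions rows cols)

-- ===== LEMMAS AND PROOFS =====

-- The inner (column) loop of A, split into its three independent append streams.
theorem gpInnerA (rows cols r : Int) (cl : List Int)
    (acc : (List (Int × Int)) × (List (Int × Int)) × (List (Int × Int))) :
    cl.foldl
      (fun acc c =>
        let is_edge_r : Bool := r == 0 || r == rows - 1
        let is_edge_c : Bool := c == 0 || c == cols - 1
        if is_edge_r && is_edge_c then (acc.1 ++ [(r, c)], acc.2.1, acc.2.2)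
        else if is_edge_r || is_edge_c then (acc.1, acc.2.1 ++ [(r, c)], acc.2.2)
        else (acc.1, acc.2.1, acc.2.2 ++ [(r, c)])) acc
    = if r == 0 || r == rows - 1 then
        (acc.1 ++ (cl.filter (fun c => c == 0 || c == cols - 1)).map (fun c => (r, c)),
         acc.2.1 ++ (cl.filter (fun c => !(c == 0 || c == cols - 1))).map (fun c => (r, c)),
         acc.2.2)
      else
        (acc.1,
         acc.2.1 ++ (cl.filter (fun c => c == 0 || c == cols - 1)).map (fun c => (r, c)),
         acc.2.2 ++ (cl.filter (fun c => !(c == 0 || c == cols - 1))).map (fun c => (r, c))) := by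
  induction cl generalizing acc with
  | nil => by_cases hr : (r == 0 || r == rows - 1) = true <;> simp [hr]
  | cons c t ih =>
    rw [List.foldl_cons, ih]
    by_cases hr : (r == 0 || r == rows - 1) = true <;>
      by_cases hc : (c == 0 || c == cols - 1) = true <;>
        simp [hr, hc, List.filter_cons] <;> split_ifs with h <;> simp_all

-- The outer (row) loop of A over the already-split inner loop.
theorem gpOuterA (rows cols : Int) (rl : List Int)
    (acc : (List (Int × Int)) × (List (Int × Int)) × (List (Int × Int))) :
    rl.foldl
      (fun acc r =>
        if r == 0 || r == rows - 1 then
          (acc.1 ++ ((PySem.List.pyRange 0 cols).filter (fun c => c == 0 || c == cols - 1)).map (fun c => (r, c)),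
           acc.2.1 ++ ((PySem.List.pyRange 0 cols).filter (fun c => !(c == 0 || c == cols - 1))).map (fun c => (r, c)),
           acc.2.2)
        else
          (acc.1,
           acc.2.1 ++ ((PySem.List.pyRange 0 cols).filter (fun c => c == 0 || c == cols - 1)).map (fun c => (r, c)),
           acc.2.2 ++ ((PySem.List.pyRange 0 cols).filter (fun c => !(c == 0 || c == cols - 1))).map (fun c => (r, c)))) acc
    = (acc.1 ++ (rl.filter (fun r => r == 0 || r == rows - 1)).flatMap
          (fun r => ((PySem.List.pyRange 0 cols).filter (fun c => c == 0 || c == cols - 1)).map (fun c => (r, c))),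
       acc.2.1 ++ rl.flatMap (fun r =>
          if r == 0 || r == rows - 1 then
            ((PySem.List.pyRange 0 cols).filter (fun c => !(c == 0 || c == cols - 1))).map (fun c => (r, c))
          else
            ((PySem.List.pyRange 0 cols).filter (fun c => c == 0 || c == cols - 1)).map (fun c => (r, c))),
       acc.2.2 ++ (rl.filter (fun r => !(r == 0 || r == rows - 1))).flatMap
          (fun r => ((PySem.List.pyRange 0 cols).filter (fun c => !(c == 0 || c == cols - 1))).map (fun c => (r, c)))) := by
  induction rl generalizing acc with
  | nil => simp
  | cons r t ih =>
    rw [List.foldl_cons, ih]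
    by_cases hr : (r == 0 || r == rows - 1) = true <;>
      simp [hr, List.filter_cons, List.append_assoc] <;> split_ifs with h <;> simp_all <;> tauto

theorem gpRangeNil {a b : Int} (h : b ≤ a) : PySem.List.pyRange a b = [] := by
  rw [PySem.List.pyRange_one]
  have : (b - a).toNat = 0 := by omega
  simp [this]

theorem gpRangeSplit {n : Int} (h : 2 ≤ n) :
    PySem.List.pyRange 0 n = 0 :: (PySem.List.pyRange 1 (n - 1) ++ [n - 1]) := by
  have h1 : PySem.List.pyRange 0 n = 0 :: PySem.List.pyRange 1 n :=
    PySem.List.pyRange_one_cons (by omega)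
  have h2 : PySem.List.pyRange 1 n = PySem.List.pyRange 1 (n - 1) ++ [n - 1] := by
    have h3 := PySem.List.pyRange_one_succ_right (a := 1) (b := n - 1) (by omega)
    rwa [show n - 1 + 1 = n by ring] at h3
  rw [h1, h2]

-- boundary filter of range(n): the boundary indices, in order, without duplicates
theorem gpFilterBound {n : Int} (h : 1 ≤ n) :
    (PySem.List.pyRange 0 n).filter (fun x => x == 0 || x == n - 1)
      = if n == 1 then [(0 : Int)] else [0, n - 1] := by
  by_cases h1 : n = 1
  · subst h1; decide
  · have h2 : 2 ≤ n := by omega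
    rw [gpRangeSplit h2]
    have hmid : (PySem.List.pyRange 1 (n - 1)).filter (fun x => x == 0 || x == n - 1) = [] := by
      rw [List.filter_eq_nil_iff]
      intro x hx
      have := PySem.List.mem_pyRange_one.mp hx
      simp only [Bool.or_eq_true, beq_iff_eq]
      omega
    rw [List.filter_cons, List.filter_append, hmid,
      if_neg (by simp [h1] : ¬ ((n : Int) == 1) = true)]
    simp

-- interior filter of range(n): the middle range
theorem gpFilterMid {n : Int} (h : 1 ≤ n) :
    (PySem.List.pyRange 0 n).filter (fun x => !(x == 0 || x == n - 1))
      = PySem.List.pyRange 1 (n - 1) := by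
  by_cases h1 : n = 1
  · subst h1
    rw [gpRangeNil (a := 1) (b := (1 : Int) - 1) (by omega)]
    decide
  · have h2 : 2 ≤ n := by omega
    rw [gpRangeSplit h2]
    have hmid : (PySem.List.pyRange 1 (n - 1)).filter (fun x => !(x == 0 || x == n - 1))
        = PySem.List.pyRange 1 (n - 1) := by
      rw [List.filter_eq_self]
      intro x hx
      have := PySem.List.mem_pyRange_one.mp hx
      simp only [Bool.not_eq_eq_eq_not, Bool.not_true, Bool.or_eq_false_iff, beq_eq_false_iff_ne]
      omega
    rw [List.filter_cons, List.filter_append, hmid]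
    simp

theorem gpEq (rows cols : Int) : grid_positions rows cols = grid_positions_alt rows cols := by
  unfold grid_positions grid_positions_alt
  simp only [gpInnerA]
  rw [gpOuterA]
  by_cases hr0 : rows ≤ 0
  · rw [gpRangeNil (a := 0) (b := rows) (by omega)]
    simp [hr0]
  by_cases hc0 : cols ≤ 0
  · rw [gpRangeNil (a := 0) (b := cols) (by omega)]
    simp [hc0]
  · -- rows ≥ 1, cols ≥ 1
    have hrow : (1 : Int) ≤ rows := by omega
    have hcol : (1 : Int) ≤ cols := by omega
    rw [if_neg (by omega)]
    simp only [gpFilterBound hcol, gpFilterMid hcol, gpFilterBound hrow, gpFilterMid hrow,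
      List.nil_append, PySem.List.foldl_append_eq_flatMap]
    by_cases hr1 : rows = 1
    · subst hr1
      rw [show PySem.List.pyRange 0 1 = [(0 : Int)] by decide,
          gpRangeNil (a := 1) (b := (1 : Int) - 1) (by omega)]
      simp
    · have hr2 : (2 : Int) ≤ rows := by omega
      rw [gpRangeSplit hr2]
      have hmidfalse : ∀ x ∈ PySem.List.pyRange 1 (rows - 1),
          (x == 0 || x == rows - 1) = false := by
        intro x hx
        have := PySem.List.mem_pyRange_one.mp hx
        simp only [Bool.or_eq_false_iff, beq_eq_false_iff_ne, ne_eq]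
        omega
      have hE : (PySem.List.pyRange 1 (rows - 1)).flatMap (fun r =>
            if (r == 0 || r == rows - 1) = true then
              (PySem.List.pyRange 1 (cols - 1)).map (fun c => (r, c))
            else (if (cols == 1) = true then [(0 : Int)] else [0, cols - 1]).map (fun c => (r, c)))
          = (PySem.List.pyRange 1 (rows - 1)).flatMap (fun r =>
            (if (cols == 1) = true then [(0 : Int)] else [0, cols - 1]).map (fun c => (r, c))) :=
        List.flatMap_congr (fun x hx => by rw [if_neg (by simp [hmidfalse x hx])])
      simp only [List.flatMap_cons, List.flatMap_append, hE]
      rw [if_pos (by omega : rows > 1),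
          if_neg (by simp [hr1] : ¬ ((rows : Int) == 1) = true)]
      simp [List.append_assoc]

-- ===== VERDICT (by name: the statement is the Claim_ definition above) =====
theorem grid_positions_spec : Claim_equal_grid_positions := by
  intro rows cols _
  unfold Spec_grid_positions
  exact gpEq rows cols
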